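-- pv_equiv track=rewrite | github.com/huyhoang17/framler | framler/cleaners.py | split_punctuation
-- ===== SOURCE A (Python) =====
-- import string
--
-- def split_punctuation(text):
--     '''
--     Split string at punctuation characters
--     :rtype list:
--     '''
--     rtext = []
--     temp_text = []
--     for char in text:
--         if char not in string.punctuation:
--             temp_text.append(char)
--         else:
--             new_text = "".join(temp_text).lower().strip()
--             rtext.append(new_text)
--             temp_text = []
--     rtext.append("".join(temp_text).lower().strip())
--     return rtext
-- ===== SOURCE B (Python) =====
-- import re
-- import string
--
-- _PUNCT_RE = re.compile("[" + re.escape(string.punctuation) + "]")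
--
-- def split_punctuation(text):
--     return [p.lower().strip() for p in _PUNCT_RE.split(text)]
-- ===== Notes on version B (the rewrite author's own statement) =====
-- stated objective: idiomatic
-- what changed: Replaces the stateful char-by-char accumulator loop with a regex split on a punctuation character class followed by a lower/strip map over the segments.
import Mathlib
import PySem

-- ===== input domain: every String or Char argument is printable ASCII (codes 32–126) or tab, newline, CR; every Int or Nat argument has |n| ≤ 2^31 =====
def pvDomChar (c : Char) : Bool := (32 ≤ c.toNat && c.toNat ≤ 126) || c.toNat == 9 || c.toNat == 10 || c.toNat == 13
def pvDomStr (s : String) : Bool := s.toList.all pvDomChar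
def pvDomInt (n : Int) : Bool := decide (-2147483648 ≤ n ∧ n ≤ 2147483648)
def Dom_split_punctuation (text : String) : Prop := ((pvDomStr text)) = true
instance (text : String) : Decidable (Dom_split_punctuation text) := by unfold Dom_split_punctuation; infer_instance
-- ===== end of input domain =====

-- B replaces A's stateful accumulator loop by a split-then-map decomposition (idiomatic, same cost).

-- ===== PORT A =====
-- string.punctuation
def pvPunct : List Char := "!\"#$%&'()*+,-./:;<=>?@[\\]^_`{|}~".toList

-- "".join(temp).lower().strip()
def pvFlush (temp : List Char) : String :=
  PySem.Str.strip (PySem.Str.lower (String.ofList temp))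

def split_punctuation (text : String) : List String :=
  let st := text.toList.foldl
    (fun (st : List String × List Char) char =>
      if ¬ pvPunct.contains char then (st.1, st.2 ++ [char])
      else (st.1 ++ [pvFlush st.2], []))
    ([], [])
  st.1 ++ [pvFlush st.2]

-- ===== PORT B =====
-- re.split("[<escaped punctuation>]", text): split at each punctuation char,
-- keeping empty segments (leading/trailing/adjacent), ported as a structural splitter
def pvReSplit : List Char → List (List Char)
  | [] => [[]]
  | c :: rest =>
    if pvPunct.contains c then [] :: pvReSplit rest
    else
      match pvReSplit rest with
      | seg :: segs => (c :: seg) :: segs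
      | [] => [[c]]

def split_punctuation_alt (text : String) : List String :=
  (pvReSplit text.toList).map (fun p => PySem.Str.strip (PySem.Str.lower (String.ofList p)))

-- ===== PRECONDITION & SPEC =====
def Spec_split_punctuation (text : String) (out : List String) : Prop := out = split_punctuation_alt text
instance (text : String) (out : List String) : Decidable (Spec_split_punctuation text out) := by unfold Spec_split_punctuation; infer_instance

-- ===== CLAIM (what is proved, stated in full; the proofs are below) =====
def Claim_equal_split_punctuation : Prop := ∀ (text : String), Dom_split_punctuation text → Spec_split_punctuation text (split_punctuation text)

-- ===== LEMMAS AND PROOFS =====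

-- proof-side name for A's loop body (definitionally the inline lambda in the port)
def pvStep (st : List String × List Char) (char : Char) : List String × List Char :=
  if ¬ pvPunct.contains char then (st.1, st.2 ++ [char]) else (st.1 ++ [pvFlush st.2], [])

theorem pvReSplit_ne_nil (cs : List Char) : pvReSplit cs ≠ [] := by
  cases cs with
  | nil => simp [pvReSplit]
  | cons c rest =>
    simp only [pvReSplit]
    split
    · simp
    · cases h : pvReSplit rest <;> simp

-- loop invariant: the flushed fold equals acc ++ map over the splitter with temp prepended to the first segment
theorem pvLoop (cs : List Char) : ∀ (acc : List String) (temp : List Char),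
    (cs.foldl pvStep (acc, temp)).1 ++ [pvFlush (cs.foldl pvStep (acc, temp)).2]
    = acc ++ (match pvReSplit cs with
              | seg :: segs => pvFlush (temp ++ seg) :: segs.map pvFlush
              | [] => [pvFlush temp]) := by
  induction cs with
  | nil => intro acc temp; simp [pvReSplit]
  | cons c rest ih =>
    intro acc temp
    rw [List.foldl_cons]
    by_cases hc : c ∈ pvPunct
    · rw [show pvStep (acc, temp) c = (acc ++ [pvFlush temp], []) from by simp [pvStep, hc]]
      cases h : pvReSplit rest with
      | nil => exact absurd h (pvReSplit_ne_nil rest)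
      | cons seg segs =>
        have hthis := ih (acc ++ [pvFlush temp]) []
        rw [h] at hthis
        rw [hthis, show pvReSplit (c :: rest) = [] :: seg :: segs from by simp [pvReSplit, hc, h]]
        simp
    · rw [show pvStep (acc, temp) c = (acc, temp ++ [c]) from by simp [pvStep, hc]]
      cases h : pvReSplit rest with
      | nil => exact absurd h (pvReSplit_ne_nil rest)
      | cons seg segs =>
        have hthis := ih acc (temp ++ [c])
        rw [h] at hthis
        rw [hthis, show pvReSplit (c :: rest) = (c :: seg) :: segs from by simp [pvReSplit, hc, h]]
        simp

-- ===== VERDICT (by name: the statement is the Claim_ definition above) =====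
theorem split_punctuation_spec : Claim_equal_split_punctuation := by
  intro text _
  show split_punctuation text = split_punctuation_alt text
  have h := pvLoop text.toList [] []
  cases hh : pvReSplit text.toList with
  | nil => exact absurd hh (pvReSplit_ne_nil text.toList)
  | cons seg segs =>
    rw [hh] at h
    show (text.toList.foldl pvStep ([], [])).1 ++ [pvFlush (text.toList.foldl pvStep ([], [])).2]
        = (pvReSplit text.toList).map pvFlush
    rw [h, hh]
    simp
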